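-- pv_equiv track=rewrite | github.com/lukaskrepel/BonkyGFX | generate.py | group_ranges
-- ===== SOURCE A (Python) =====
-- def group_ranges(sprites):
--     last_id = cur_range = None
--     for i in sorted(sprites.keys()):
--         s = sprites[i]
--         if last_id is None:
--             cur_range = [s]
--         elif last_id + 1 == i and len(cur_range) < 255:
--             cur_range.append(s)
--         else:
--             yield (last_id - len(cur_range) + 1, cur_range)
--             cur_range = [s]
--         last_id = i
--     if cur_range:
--         yield (last_id - len(cur_range) + 1, cur_range)
-- ===== SOURCE B (Python) =====
-- def group_ranges(sprites):
--     # Phase 1: build maximal contiguous runs (start_id, values).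
--     runs = []
--     for i in sorted(sprites.keys()):
--         if runs and runs[-1][0] + len(runs[-1][1]) == i:
--             runs[-1][1].append(sprites[i])
--         else:
--             runs.append((i, [sprites[i]]))
--     # Phase 2: split each run into chunks of at most 255 values.
--     for start, vals in runs:
--         while len(vals) > 255:
--             yield (start, vals[:255])
--             start += 255
--             vals = vals[255:]
--         yield (start, vals)
-- ===== Notes on version B (the rewrite author's own statement) =====
-- stated objective: alternative
-- what changed: Replaces A's single state-machine loop (which tests contiguity and the 255 cap together and flushes as it goes) by two phases: first build the maximal contiguous runs, then split each run into <=255-sized chunks with slice arithmetic.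
import Mathlib
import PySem

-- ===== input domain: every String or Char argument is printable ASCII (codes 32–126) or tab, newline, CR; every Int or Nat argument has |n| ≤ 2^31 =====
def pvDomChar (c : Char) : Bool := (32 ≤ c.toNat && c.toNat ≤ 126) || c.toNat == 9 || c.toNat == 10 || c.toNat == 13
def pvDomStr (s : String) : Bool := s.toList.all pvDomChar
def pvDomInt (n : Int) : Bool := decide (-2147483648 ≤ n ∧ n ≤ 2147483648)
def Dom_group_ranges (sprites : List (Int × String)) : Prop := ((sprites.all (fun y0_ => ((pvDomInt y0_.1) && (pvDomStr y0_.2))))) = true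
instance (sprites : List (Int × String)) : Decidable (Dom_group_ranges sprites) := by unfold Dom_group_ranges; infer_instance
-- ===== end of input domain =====

-- B replaces A's single flush-as-you-go state machine by a runs-then-chunks two-phase pass; alternative decomposition, same cost.

-- ===== PORT A =====
-- A's loop over sorted keys with state (last_id, cur_range, emitted-so-far).
-- sprites[i] is ported as getD with default "" — i is drawn from the dict's keys, so KeyError is impossible.
def groupLoopA (g : Int → String) : List Int → Option Int → List String →
    List (Int × List String) → List (Int × List String)
  | [], lastId, cur, acc =>
      -- 'if cur_range:' final yield; last_id is always set when cur_range is nonempty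
      if cur.isEmpty then acc
      else match lastId with
        | some p => acc ++ [(p - cur.length + 1, cur)]
        | none => acc  -- unreachable: lastId = none only before the first iteration, where cur = []
  | i :: ks, lastId, cur, acc =>
      match lastId with
      | none => groupLoopA g ks (some i) [g i] acc
      | some p =>
        if p + 1 = i ∧ cur.length < 255 then
          groupLoopA g ks (some i) (cur ++ [g i]) acc
        else
          groupLoopA g ks (some i) [g i] (acc ++ [(p - cur.length + 1, cur)])

def group_ranges (sprites : List (Int × String)) : List (Int × List String) :=
  let d := PySem.Dict.ofList sprites
  groupLoopA (fun i => d.getD i "") (PySem.List.sorted d.keys (fun x => x) false) none [] []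

-- ===== PORT B =====
-- Phase 1: the run-building loop; the currently open run (start, vals) is the last element of runs,
-- carried here as the two extra parameters (runs = done ++ [(start, vals)]).
def runsB (g : Int → String) : List Int → Int → List String → List (Int × List String)
  | [], start, vals => [(start, vals)]
  | i :: ks, start, vals =>
      if start + vals.length = i then runsB g ks start (vals ++ [g i])
      else (start, vals) :: runsB g ks i [g i]

-- Phase 2: the 'while len(vals) > 255' chunking loop; vals[:255] / vals[255:] via PySem slices.
def chunksB (start : Int) (vals : List String) : List (Int × List String) :=
  if 255 < vals.length then
    (start, PySem.List.slice vals none (some 255)) ::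
      chunksB (start + 255) (PySem.List.slice vals (some 255) none)
  else [(start, vals)]
termination_by vals.length
decreasing_by
  rw [show ((255 : Int)) = ((255 : Nat) : Int) by norm_num, PySem.List.slice_from_natCast]
  simp; omega

def group_ranges_alt (sprites : List (Int × String)) : List (Int × List String) :=
  let d := PySem.Dict.ofList sprites
  let g := fun i => d.getD i ""
  match PySem.List.sorted d.keys (fun x => x) false with
  | [] => []
  | i :: ks => (runsB g ks i [g i]).flatMap (fun r => chunksB r.1 r.2)

-- ===== PRECONDITION & SPEC =====
def Spec_group_ranges (sprites : List (Int × String)) (out : List (Int × List String)) : Prop := out = group_ranges_alt sprites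
instance (sprites : List (Int × String)) (out : List (Int × List String)) : Decidable (Spec_group_ranges sprites out) := by unfold Spec_group_ranges; infer_instance

-- ===== CLAIM (what is proved, stated in full; the proofs are below) =====
def Claim_equal_group_ranges : Prop := ∀ (sprites : List (Int × String)), Dom_group_ranges sprites → Spec_group_ranges sprites (group_ranges sprites)

-- ===== LEMMAS AND PROOFS =====

-- A short run (≤ 255 values) is a single chunk.
theorem chunksB_small (start : Int) (vals : List String) (h : vals.length ≤ 255) :
    chunksB start vals = [(start, vals)] := by
  rw [chunksB]
  simp [Nat.not_lt.mpr h]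

-- Splitting a run whose first 255 values are already fixed: one chunk, then the rest.
theorem chunksB_split (start : Int) (pre vals : List String)
    (hpre : pre.length = 255) (hv : vals ≠ []) :
    chunksB start (pre ++ vals) = (start, pre) :: chunksB (start + 255) vals := by
  rw [chunksB]
  have hlen : 255 < (pre ++ vals).length := by
    simp [hpre]; exact List.length_pos_iff.mpr hv
  rw [if_pos hlen]
  have h1 : PySem.List.slice (pre ++ vals) none (some 255) = pre := by
    rw [show ((255 : Int)) = ((255 : Nat) : Int) by norm_num,
      PySem.List.slice_to_natCast]
    simp [← hpre]
  have h2 : PySem.List.slice (pre ++ vals) (some 255) none = vals := by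
    rw [show ((255 : Int)) = ((255 : Nat) : Int) by norm_num,
      PySem.List.slice_from_natCast]
    simp [← hpre]
  rw [h1, h2]

-- Emitting the chunks of runsB when the open run carries a fixed full prefix 'pre' of 255 values:
-- the chunk (start, pre) comes first, the rest is as if the run had started after it.
theorem runsB_flat_shift (g : Int → String) (ks : List Int) (start : Int)
    (pre vals : List String) (hpre : pre.length = 255) (hv : vals ≠ []) :
    (runsB g ks start (pre ++ vals)).flatMap (fun r => chunksB r.1 r.2) =
      (start, pre) :: (runsB g ks (start + 255) vals).flatMap (fun r => chunksB r.1 r.2) := by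
  induction ks generalizing vals with
  | nil =>
    simp [runsB, chunksB_split start pre vals hpre hv]
  | cons i ks ih =>
    simp only [runsB]
    have hc : ((start + ((pre ++ vals).length : Int) = i)) ↔ (start + 255 + (vals.length : Int) = i) := by
      simp [hpre]; omega
    by_cases h : start + 255 + (vals.length : Int) = i
    · rw [if_pos (hc.mpr h), if_pos h, List.append_assoc]
      exact ih (vals ++ [g i]) (by simp)
    · rw [if_neg (fun hh => h (hc.mp hh)), if_neg h]
      simp only [List.flatMap_cons]
      rw [chunksB_split start pre vals hpre hv]
      simp

-- Main invariant: A's loop from state (last_id = start + |cur| - 1, cur, acc) emits acc followed by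
-- the chunks of the runs B builds from the open run (start, cur).
theorem loopA_eq_runs (g : Int → String) (ks : List Int) (p start : Int)
    (cur : List String) (acc : List (Int × List String))
    (hp : p = start + cur.length - 1)
    (hne : cur ≠ []) (hle : cur.length ≤ 255) :
    groupLoopA g ks (some p) cur acc =
      acc ++ (runsB g ks start cur).flatMap (fun r => chunksB r.1 r.2) := by
  induction ks generalizing p start cur acc with
  | nil =>
    simp [groupLoopA, hne, runsB, chunksB_small start cur hle]
    omega
  | cons i ks ih =>
    simp only [groupLoopA, runsB]
    by_cases hcont : start + (cur.length : Int) = i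
    · by_cases hlt : cur.length < 255
      · -- extend the current run on both sides
        rw [if_pos ⟨by omega, hlt⟩, if_pos hcont]
        exact ih i start (cur ++ [g i]) acc (by simp; omega) (by simp) (by simp; omega)
      · -- contiguous but the 255 cap is hit: A cuts, B's run keeps growing
        have h255 : cur.length = 255 := by omega
        rw [if_neg (by intro h; exact hlt h.2), if_pos hcont]
        rw [show p - (cur.length : Int) + 1 = start by omega]
        rw [ih i i [g i] (acc ++ [(start, cur)]) (by simp) (by simp) (by simp)]
        rw [runsB_flat_shift g ks start cur [g i] h255 (by simp)]
        rw [show start + 255 = i by omega]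
        simp
    · -- not contiguous: both close the current run
      rw [if_neg (by intro h; exact hcont (by omega)), if_neg hcont]
      rw [show p - (cur.length : Int) + 1 = start by omega]
      rw [ih i i [g i] (acc ++ [(start, cur)]) (by simp) (by simp) (by simp)]
      simp [chunksB_small start cur hle]

-- ===== VERDICT (by name: the statement is the Claim_ definition above) =====
theorem group_ranges_spec : Claim_equal_group_ranges := by
  intro sprites _
  unfold Spec_group_ranges group_ranges group_ranges_alt
  cases h : PySem.List.sorted (PySem.Dict.ofList sprites).keys (fun x => x) false with
  | nil => simp [h, groupLoopA]
  | cons i ks =>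
    simp only [h, groupLoopA]
    rw [loopA_eq_runs _ ks i i _ [] (by simp) (by simp) (by simp)]
    simp
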